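-- pv_equiv track=rewrite | github.com/sabumi2002/Algorithm | 프로그래머스/기초/day_15/ex3_1로만들기/sol.py | solution
-- ===== SOURCE A (Python) =====
-- def solution(num_list):
--     list_count = [0 for _ in range(len(num_list))]
--     while max(num_list)>1:
--         for idx in range(len(num_list)):
--             if num_list[idx] <= 1:
--                 continue
--             elif num_list[idx] % 2 ==0:
--                 list_count[idx] += 1
--                 num_list[idx] //=2
--             elif num_list[idx] % 2 == 1:
--                 list_count[idx] += 1
--                 num_list[idx] //=2
--     answer = sum(list_count)
--     return answer
-- ===== SOURCE B (Python) =====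
-- def solution(num_list):
--     return sum(x.bit_length() - 1 for x in num_list if x > 1)
-- ===== Notes on version B (the rewrite author's own statement) =====
-- stated objective: faster
-- what changed: Replaces the repeated whole-list halving sweep with a single pass summing x.bit_length()-1 over elements > 1 (the closed form for the number of floor-halvings down to 1); A also mutates num_list in place, B does not.
-- outside the precondition, e.g. on solution([]): A raises ValueError, B returns 0
import Mathlib
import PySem

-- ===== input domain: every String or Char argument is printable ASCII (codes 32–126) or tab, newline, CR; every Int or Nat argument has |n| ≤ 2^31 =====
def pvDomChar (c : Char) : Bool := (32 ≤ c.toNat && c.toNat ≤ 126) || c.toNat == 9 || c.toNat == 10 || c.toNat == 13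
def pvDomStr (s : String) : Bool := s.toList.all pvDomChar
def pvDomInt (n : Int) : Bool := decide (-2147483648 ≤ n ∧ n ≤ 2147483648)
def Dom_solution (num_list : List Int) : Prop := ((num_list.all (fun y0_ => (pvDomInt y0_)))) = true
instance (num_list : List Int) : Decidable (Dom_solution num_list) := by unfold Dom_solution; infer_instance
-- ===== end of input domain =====

-- B replaces A's repeated whole-list halving sweeps by one pass summing bit_length-1
-- over elements > 1; note A mutates num_list in place: the equivalence proved here is
-- about the RETURN value only (B does not mutate).

-- ===== PORT A =====
-- one body of A's while-loop: the 'for idx in range(len(...))' pass over the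
-- parallel lists num_list/list_count, carried as a list of (num, count) pairs
def solStep (pairs : List (Int × Int)) : List (Int × Int) :=
  pairs.map (fun p =>
    if p.1 ≤ 1 then p
    else if PySem.Int.mod p.1 2 = 0 then (PySem.Int.floordiv p.1 2, p.2 + 1)
    else if PySem.Int.mod p.1 2 = 1 then (PySem.Int.floordiv p.1 2, p.2 + 1)
    else p)

-- 'max(num_list) > 1'; on [] Python's max raises ValueError (excluded by Pre_solution),
-- the false branch there keeps the port total
def solCond (pairs : List (Int × Int)) : Bool :=
  match PySem.List.max? (pairs.map Prod.fst) (fun x => x) with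
  | some m => 1 < m
  | none => false

-- termination measure for the while-loop
def solWeight (pairs : List (Int × Int)) : Nat := (pairs.map (fun p => p.1.toNat)).sum

theorem solCond_exists (pairs : List (Int × Int)) (h : solCond pairs = true) :
    ∃ p ∈ pairs, 1 < p.1 := by
  unfold solCond at h
  rcases hm : PySem.List.max? (pairs.map Prod.fst) (fun x => x) with _ | m
  · rw [hm] at h; simp at h
  · rw [hm] at h
    have hmem := PySem.List.max?_mem hm
    rcases List.mem_map.1 hmem with ⟨q, hq, hq1⟩
    exact ⟨q, hq, by simp at h; omega⟩

theorem solWeight_step_le (pairs : List (Int × Int)) :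
    solWeight (solStep pairs) ≤ solWeight pairs := by
  induction pairs with
  | nil => simp [solWeight, solStep]
  | cons p t ih =>
    simp only [solWeight, solStep, List.map_cons, List.sum_cons] at *
    have hdiv := PySem.Int.floordiv_eq_ediv_of_pos (a := p.1) (b := 2) (by omega)
    have hhd : (if p.1 ≤ 1 then p
        else if PySem.Int.mod p.1 2 = 0 then (PySem.Int.floordiv p.1 2, p.2 + 1)
        else if PySem.Int.mod p.1 2 = 1 then (PySem.Int.floordiv p.1 2, p.2 + 1)
        else p).1.toNat ≤ p.1.toNat := by
      split_ifs with h1 h2 h3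
      · exact le_refl _
      · show (PySem.Int.floordiv p.1 2).toNat ≤ p.1.toNat; rw [hdiv]; omega
      · show (PySem.Int.floordiv p.1 2).toNat ≤ p.1.toNat; rw [hdiv]; omega
      · exact le_refl _
    omega

theorem solWeight_step_lt (pairs : List (Int × Int)) (h : ∃ p ∈ pairs, 1 < p.1) :
    solWeight (solStep pairs) < solWeight pairs := by
  induction pairs with
  | nil => simp at h
  | cons p t ih =>
    simp only [solWeight, solStep, List.map_cons, List.sum_cons] at *
    rcases h with ⟨q, hq, hq1⟩
    have hdiv := PySem.Int.floordiv_eq_ediv_of_pos (a := p.1) (b := 2) (by omega)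
    have hhd : (if p.1 ≤ 1 then p
        else if PySem.Int.mod p.1 2 = 0 then (PySem.Int.floordiv p.1 2, p.2 + 1)
        else if PySem.Int.mod p.1 2 = 1 then (PySem.Int.floordiv p.1 2, p.2 + 1)
        else p).1.toNat ≤ p.1.toNat := by
      split_ifs with h1 h2 h3
      · exact le_refl _
      · show (PySem.Int.floordiv p.1 2).toNat ≤ p.1.toNat; rw [hdiv]; omega
      · show (PySem.Int.floordiv p.1 2).toNat ≤ p.1.toNat; rw [hdiv]; omega
      · exact le_refl _
    rcases List.mem_cons.1 hq with rfl | hqt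
    · have hstrict : (if q.1 ≤ 1 then q
          else if PySem.Int.mod q.1 2 = 0 then (PySem.Int.floordiv q.1 2, q.2 + 1)
          else if PySem.Int.mod q.1 2 = 1 then (PySem.Int.floordiv q.1 2, q.2 + 1)
          else q).1.toNat < q.1.toNat := by
        rw [if_neg (by omega : ¬ q.1 ≤ 1)]
        split_ifs with h2 h3
        · show (PySem.Int.floordiv q.1 2).toNat < q.1.toNat; rw [hdiv]; omega
        · show (PySem.Int.floordiv q.1 2).toNat < q.1.toNat; rw [hdiv]; omega
        · exfalso
          have := PySem.Int.mod_two_eq q.1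
          omega
      have := solWeight_step_le t
      simp only [solWeight, solStep] at this
      omega
    · have := ih ⟨q, hqt, hq1⟩
      omega

-- 'while max(num_list) > 1: <pass>'
def solWhile (pairs : List (Int × Int)) : List (Int × Int) :=
  if h : solCond pairs then solWhile (solStep pairs) else pairs
termination_by solWeight pairs
decreasing_by exact solWeight_step_lt pairs (solCond_exists pairs h)

def solution (num_list : List Int) : Int :=
  -- list_count = [0 for _ in range(len(num_list))], zipped with num_list
  let pairs := num_list.map (fun n => (n, (0 : Int)))
  let final := solWhile pairs
  (final.map Prod.snd).sum

-- ===== PORT B =====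
-- sum(x.bit_length() - 1 for x in num_list if x > 1)
def solution_alt (num_list : List Int) : Int :=
  ((num_list.filter (fun x => 1 < x)).map
    (fun x => (PySem.Int.bitLength x : Int) - 1)).sum

-- ===== PRECONDITION & SPEC =====
-- Pre_ excludes only the empty list, on which A's max([]) raises ValueError.
def Pre_solution (num_list : List Int) : Prop := num_list ≠ []
instance (num_list : List Int) : Decidable (Pre_solution num_list) := by
  unfold Pre_solution; infer_instance
def pvWitness_solution : List Int := [3, 1, 8]

def Spec_solution (num_list : List Int) (out : Int) : Prop := out = solution_alt num_list
instance (num_list : List Int) (out : Int) : Decidable (Spec_solution num_list out) := by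
  unfold Spec_solution; infer_instance

-- ===== CLAIM (what is proved, stated in full; the proofs are below) =====
def Claim_equal_solution : Prop := ∀ (num_list : List Int), Dom_solution num_list →
  Pre_solution num_list → Spec_solution num_list (solution num_list)
-- ===== LEMMAS AND PROOFS =====

-- per-element potential: what B contributes for one element
def solPhi (n : Int) : Int := if 1 < n then (PySem.Int.bitLength n : Int) - 1 else 0

theorem solPhi_halve (n : Int) (h : 1 < n) :
    solPhi n = 1 + solPhi (PySem.Int.floordiv n 2) := by
  have hdiv := PySem.Int.floordiv_eq_ediv_of_pos (a := n) (b := 2) (by omega)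
  have hbl := PySem.Int.bitLength_of_pos (n := n) (by omega)
  by_cases h2 : 1 < PySem.Int.floordiv n 2
  · simp only [solPhi, if_pos h, if_pos h2]
    omega
  · rw [hdiv] at h2
    have hn : n = 2 ∨ n = 3 := by omega
    rcases hn with rfl | rfl <;> decide

-- the invariant preserved by each pass of the while-loop
def solInv (pairs : List (Int × Int)) : Int :=
  (pairs.map (fun p => p.2 + solPhi p.1)).sum

theorem solInv_step (pairs : List (Int × Int)) : solInv (solStep pairs) = solInv pairs := by
  induction pairs with
  | nil => rfl
  | cons p t ih =>
    simp only [solInv, solStep, List.map_cons, List.sum_cons] at *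
    have hhd : (if p.1 ≤ 1 then p
        else if PySem.Int.mod p.1 2 = 0 then (PySem.Int.floordiv p.1 2, p.2 + 1)
        else if PySem.Int.mod p.1 2 = 1 then (PySem.Int.floordiv p.1 2, p.2 + 1)
        else p).2 + solPhi (if p.1 ≤ 1 then p
        else if PySem.Int.mod p.1 2 = 0 then (PySem.Int.floordiv p.1 2, p.2 + 1)
        else if PySem.Int.mod p.1 2 = 1 then (PySem.Int.floordiv p.1 2, p.2 + 1)
        else p).1 = p.2 + solPhi p.1 := by
      split_ifs with h1 h2 h3
      · rfl
      · show p.2 + 1 + solPhi (PySem.Int.floordiv p.1 2) = p.2 + solPhi p.1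
        rw [solPhi_halve p.1 (by omega)]; ring
      · show p.2 + 1 + solPhi (PySem.Int.floordiv p.1 2) = p.2 + solPhi p.1
        rw [solPhi_halve p.1 (by omega)]; ring
      · rfl
    rw [hhd, ih]

theorem solInv_while (pairs : List (Int × Int)) : solInv (solWhile pairs) = solInv pairs := by
  induction pairs using solWhile.induct with
  | case1 pairs h ih =>
    rw [solWhile, dif_pos h, ih, solInv_step]
  | case2 pairs h =>
    rw [solWhile, dif_neg h]

-- at the fixpoint every number is ≤ 1
theorem solWhile_post (pairs : List (Int × Int)) :
    ∀ p ∈ solWhile pairs, p.1 ≤ 1 := by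
  induction pairs using solWhile.induct with
  | case1 pairs h ih =>
    rw [solWhile, dif_pos h]; exact ih
  | case2 pairs h =>
    rw [solWhile, dif_neg h]
    intro p hp
    unfold solCond at h
    rcases hm : PySem.List.max? (pairs.map Prod.fst) (fun x => x) with _ | m
    · have := (PySem.List.max?_eq_none_iff _ _).1 hm
      simp [List.map_eq_nil_iff.1 this] at hp
    · rw [hm] at h
      have := PySem.List.max?_isMax hm (p.1) (List.mem_map.2 ⟨p, hp, rfl⟩)
      simp at h this
      omega

theorem sum_snd_eq_inv (pairs : List (Int × Int)) (h : ∀ p ∈ pairs, p.1 ≤ 1) :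
    (pairs.map Prod.snd).sum = solInv pairs := by
  induction pairs with
  | nil => rfl
  | cons p t ih =>
    simp only [solInv, List.map_cons, List.sum_cons] at *
    have hp := h p (List.mem_cons_self ..)
    rw [ih (fun q hq => h q (List.mem_cons_of_mem _ hq))]
    simp only [solPhi, if_neg (by omega : ¬ 1 < p.1)]
    ring

theorem solInv_init (num_list : List Int) :
    solInv (num_list.map (fun n => (n, (0 : Int)))) = solution_alt num_list := by
  induction num_list with
  | nil => rfl
  | cons n t ih =>
    simp only [solInv, List.map_cons, List.sum_cons] at ih ⊢
    show (0 : Int) + solPhi n + _ = _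
    rw [ih]
    by_cases h : 1 < n
    · simp [solution_alt, solPhi, h]
    · simp [solution_alt, solPhi, h]

-- ===== VERDICT (by name: the statement is the Claim_ definition above) =====
theorem solution_spec : Claim_equal_solution := by
  intro num_list _ _
  unfold Spec_solution solution
  rw [sum_snd_eq_inv _ (solWhile_post _), solInv_while, solInv_init]
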